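-- pv_equiv track=rewrite | github.com/MrBrantCode/unitest_baseline | mut_generate/mist_train_cf/cf_88072/solution.py | unique_words_with_vowels
-- ===== SOURCE A (Python) =====
-- def unique_words_with_vowels(string):
--     vowels = ['a', 'e', 'i', 'o', 'u']
--     word_set = set()
--
--     words = string.split()
--
--     for word in words:
--         if word[0].lower() in vowels:
--             continue
--
--         has_consecutive_vowels = False
--         count = 0
--         for letter in word:
--             if letter.lower() in vowels:
--                 count += 1
--                 if count >= 3:
--                     has_consecutive_vowels = True
--                     break
--             else:
--                 count = 0
--
--         if has_consecutive_vowels: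
--             continue
--
--         if any(letter.lower() in vowels for letter in word):
--             word_set.add(word)
--
--     return sorted(list(word_set))
-- ===== SOURCE B (Python) =====
-- def unique_words_with_vowels(string):
--     vowels = 'aeiou'
--     out = []
--     prev = None
--     for word in sorted(string.split()):
--         if word == prev:
--             continue
--         prev = word
--         lw = word.lower()
--         runs = ''.join(c if c in vowels else ' ' for c in lw).split()
--         if runs and lw[0] not in vowels and max(len(r) for r in runs) < 3:
--             out.append(word)
--     return out
-- ===== Notes on version B (the rewrite author's own statement) =====
-- stated objective: alternative
-- what changed: A accumulates kept words in a mutable set (testing triple vowels with a running per-character counter that breaks at 3) and sorts the set at the end; B sorts the word list FIRST, then makes one ordered pass that drops adjacent duplicates (no set at all) and appends keepers front-to-back, deciding each word by masking consonants to spaces, splitting the masked string into maximal vowel runs, and keeping the word iff runs exist, the first letter is no vowel, and the longest run is shorter than 3.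
import Mathlib
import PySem

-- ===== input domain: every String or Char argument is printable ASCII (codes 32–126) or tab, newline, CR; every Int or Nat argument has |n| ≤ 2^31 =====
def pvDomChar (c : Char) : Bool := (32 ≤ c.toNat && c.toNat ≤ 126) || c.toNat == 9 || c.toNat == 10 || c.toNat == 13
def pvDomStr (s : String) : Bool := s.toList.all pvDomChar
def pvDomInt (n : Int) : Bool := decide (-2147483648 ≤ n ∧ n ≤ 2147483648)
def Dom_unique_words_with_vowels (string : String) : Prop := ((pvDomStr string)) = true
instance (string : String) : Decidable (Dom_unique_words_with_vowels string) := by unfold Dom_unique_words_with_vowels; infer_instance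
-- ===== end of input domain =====

-- B sorts the word list first, drops adjacent duplicates in one ordered pass (no set),
-- and tests each word by splitting its consonant-masked lowercase form into vowel runs
-- (objective: alternative).

-- ===== PORT A =====
def pvVowelsA : List Char := ['a', 'e', 'i', 'o', 'u']

-- inner loop: 'count' of consecutive vowels, break (return true) once it reaches 3
def aScan : List Char → Nat → Bool
  | [], _ => false
  | c :: rest, count =>
    if pvVowelsA.contains (PySem.Chars.lowerChar c) then
      if 3 ≤ count + 1 then true else aScan rest (count + 1)
    else aScan rest 0

-- one iteration of A's 'for word in words' loop (word[0]: split() only yields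
-- nonempty words, so the [] branch of the match is unreachable)
def aProcWord (s : PySem.Set String) (word : String) : PySem.Set String :=
  match word.toList with
  | [] => s
  | c :: rest =>
    if pvVowelsA.contains (PySem.Chars.lowerChar c) then s
    else if aScan (c :: rest) 0 then s
    else if (c :: rest).any (fun l => pvVowelsA.contains (PySem.Chars.lowerChar l)) then
      PySem.Set.add s word
    else s

def unique_words_with_vowels (string : String) : List String :=
  PySem.List.sorted ((PySem.Str.split₀ string).foldl aProcWord PySem.Set.empty)
    (fun x => x) false

-- ===== PORT B =====
-- Source B's vowels = 'aeiou' is the same constant as A's vowel list; shared here as pvVowelsA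
-- ''.join(c if c in vowels else ' ' for c in lw): per-character mask, so a List.map
def bMask (c : Char) : Char := if pvVowelsA.contains c then c else ' '

-- keep test: lw = word.lower(); runs = masked lw split on whitespace;
-- keep iff runs nonempty, lw[0] no vowel, and the longest run is < 3.
-- lw[0] is only evaluated after 'runs' is truthy, which forces lw nonempty,
-- so the two unreachable branches below return a dummy false.
def bKeep (w : String) : Bool :=
  let lw := PySem.Chars.lower w.toList
  let runs := PySem.Chars.split₀ (lw.map bMask)
  match runs, lw with
  | [], _ => false
  | _ :: _, [] => false      -- unreachable: a nonempty split forces lw ≠ []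
  | r0 :: rs, c :: _ =>
    if pvVowelsA.contains c then false
    else
      -- max(len(r) for r in runs) over the nonempty runs list
      match PySem.List.max? ((r0 :: rs).map (fun r => r.length)) (fun x => x) with
      | none => false        -- unreachable: the list is nonempty
      | some m => decide (m < 3)

-- loop state: (prev, out); 'if word == prev: continue' then 'prev = word' + optional append
def bStep (st : Option String × List String) (word : String) : Option String × List String :=
  if some word == st.1 then st
  else (some word, if bKeep word then st.2 ++ [word] else st.2)

def unique_words_with_vowels_alt (string : String) : List String :=
  ((PySem.List.sorted (PySem.Str.split₀ string) (fun x => x) false).foldl bStep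
    ((none : Option String), ([] : List String))).2

-- ===== PRECONDITION & SPEC =====
def Spec_unique_words_with_vowels (string : String) (out : List String) : Prop := out = unique_words_with_vowels_alt string
instance (string : String) (out : List String) : Decidable (Spec_unique_words_with_vowels string out) := by unfold Spec_unique_words_with_vowels; infer_instance

-- ===== CLAIM (what is proved, stated in full; the proofs are below) =====
def Claim_equal_unique_words_with_vowels : Prop := ∀ (string : String), Dom_unique_words_with_vowels string → Spec_unique_words_with_vowels string (unique_words_with_vowels string)

-- ===== LEMMAS AND PROOFS =====

-- A's per-word decision, extracted as a Bool
def pvKeepA (word : String) : Bool :=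
  match word.toList with
  | [] => false
  | c :: rest =>
    if pvVowelsA.contains (PySem.Chars.lowerChar c) then false
    else if aScan (c :: rest) 0 then false
    else (c :: rest).any (fun l => pvVowelsA.contains (PySem.Chars.lowerChar l))

-- 'there are three consecutive q-chars'
def pvHasTriple (q : Char → Bool) (ls : List Char) : Bool :=
  ((ls.zip (ls.drop 1)).zip (ls.drop 2)).any (fun p => q p.1.1 && q p.1.2 && q p.2)

-- length of the leading q-run
def pvLead (q : Char → Bool) (ls : List Char) : Nat := (ls.takeWhile q).length

theorem pvHasTriple_cons3 (q : Char → Bool) (a b c : Char) (t : List Char) :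
    pvHasTriple q (a :: b :: c :: t) = ((q a && q b && q c) || pvHasTriple q (b :: c :: t)) := by
  simp [pvHasTriple]

theorem pvHasTriple_cons_neg (q : Char → Bool) (c : Char) (t : List Char) (hc : q c = false) :
    pvHasTriple q (c :: t) = pvHasTriple q t := by
  match t with
  | [] => rfl
  | [b] => rfl
  | b :: d :: t' => rw [pvHasTriple_cons3]; simp [hc]

theorem pvLead_ge3 (q : Char → Bool) (t : List Char) (h : 3 ≤ pvLead q t) :
    pvHasTriple q t = true := by
  match t with
  | [] => simp [pvLead] at h
  | [a] => by_cases ha : q a <;> simp [pvLead, List.takeWhile, ha] at h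
  | [a, b] =>
      by_cases ha : q a <;> by_cases hb : q b <;>
        simp [pvLead, List.takeWhile, ha, hb] at h
  | a :: b :: c :: t' =>
      by_cases ha : q a <;> by_cases hb : q b <;> by_cases hc : q c <;>
        simp [pvLead, List.takeWhile, ha, hb, hc, pvHasTriple_cons3] at h ⊢

theorem pvScan_eq (ls : List Char) (k : Nat) (hk : k ≤ 2) :
    aScan ls k = (pvHasTriple (fun c => pvVowelsA.contains (PySem.Chars.lowerChar c)) ls
      || decide (3 ≤ k + pvLead (fun c => pvVowelsA.contains (PySem.Chars.lowerChar c)) ls)) := by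
  set q : Char → Bool := fun c => pvVowelsA.contains (PySem.Chars.lowerChar c) with hq
  induction ls generalizing k with
  | nil =>
      simp [aScan, pvHasTriple, pvLead]
      omega
  | cons c t ih =>
      by_cases hc : q c
      · have hc' : PySem.Chars.lowerChar c ∈ pvVowelsA := by
          have h := hc; rw [hq] at h; simpa using h
        by_cases hk2 : k = 2
        · subst hk2
          have ha : aScan (c :: t) 2 = true := by simp [aScan, hc']
          have hl : pvLead q (c :: t) = pvLead q t + 1 := by
            simp [pvLead, List.takeWhile, hc]
          rw [ha, hl, decide_eq_true (by omega : 3 ≤ 2 + (pvLead q t + 1)), Bool.or_true]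
        · have h3 : ¬ 3 ≤ k + 1 := by omega
          have ha : aScan (c :: t) k = aScan t (k + 1) := by simp [aScan, hc', h3]
          rw [ha, ih (k + 1) (by omega)]
          match t with
          | [] => simp [pvHasTriple, pvLead, List.takeWhile, hc]
          | [b] =>
              by_cases hb : q b <;>
                simp [pvHasTriple, pvLead, List.takeWhile, hc, hb]
          | b :: d :: t' =>
              rw [pvHasTriple_cons3]
              by_cases hb : q b <;> by_cases hd : q d <;>
                simp [pvLead, List.takeWhile, hc, hb, hd] <;> try omega
      · have hlead : pvLead q (c :: t) = 0 := by simp [pvLead, List.takeWhile, hc]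
        have h3 : ¬ 3 ≤ k + pvLead q (c :: t) := by rw [hlead]; omega
        have ht : aScan t 0 = (pvHasTriple q t || decide (3 ≤ 0 + pvLead q t)) := ih 0 (by omega)
        simp only [aScan, hq ▸ hc, if_neg, Bool.false_eq_true, ht, decide_eq_false h3, Bool.or_false]
        rw [pvHasTriple_cons_neg q c t (by simpa using hc)]
        by_cases h3t : 3 ≤ pvLead q t
        · rw [pvLead_ge3 q t h3t]; simp [h3t]
        · simp [h3t]

theorem pvScan0_eq (ls : List Char) :
    aScan ls 0 = pvHasTriple (fun c => pvVowelsA.contains (PySem.Chars.lowerChar c)) ls := by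
  rw [pvScan_eq ls 0 (by omega)]
  by_cases h3 : 3 ≤ pvLead (fun c => pvVowelsA.contains (PySem.Chars.lowerChar c)) ls
  · rw [pvLead_ge3 _ ls h3]; simp
  · rw [decide_eq_false (by omega), Bool.or_false]

theorem pvHasTriple_map (q : Char → Bool) (f : Char → Char) (ls : List Char) :
    pvHasTriple q (ls.map f) = pvHasTriple (fun c => q (f c)) ls := by
  unfold pvHasTriple
  rw [← List.map_drop, ← List.map_drop, List.zip_map, List.zip_map, List.any_map]
  rfl

-- split a triple-search at the end of the leading q-run
theorem pvHasTriple_split (q : Char → Bool) (ls : List Char) :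
    pvHasTriple q ls
      = (decide (3 ≤ pvLead q ls) || pvHasTriple q (ls.dropWhile q)) := by
  induction ls with
  | nil => simp [pvHasTriple, pvLead]
  | cons c t ih =>
    by_cases hc : q c
    · have hl : pvLead q (c :: t) = pvLead q t + 1 := by
        simp [pvLead, List.takeWhile, hc]
      have hd : (c :: t).dropWhile q = t.dropWhile q := by
        simp [List.dropWhile, hc]
      rw [hl, hd]
      match t with
      | [] => simp [pvHasTriple, pvLead, List.dropWhile, hc]
      | [b] =>
          by_cases hb : q b <;>
            simp [pvHasTriple, pvLead, List.takeWhile, List.dropWhile, hc, hb]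
      | b :: d :: t' =>
          rw [pvHasTriple_cons3]
          rw [ih]
          by_cases hb : q b <;> by_cases hd' : q d <;>
            simp [pvLead, List.takeWhile, List.dropWhile, hc, hb, hd'] <;> omega
    · have hl : pvLead q (c :: t) = 0 := by simp [pvLead, List.takeWhile, hc]
      have hd : (c :: t).dropWhile q = c :: t := by simp [List.dropWhile, hc]
      rw [hl, hd]
      simp

-- spec-level recursion computing s.split(): the maximal nonspace runs
def pvWords : List Char → List (List Char)
  | [] => []
  | c :: r =>
    if PySem.Chars.isspace c then pvWords r
    else ((c :: r).takeWhile (fun x => !PySem.Chars.isspace x))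
          :: pvWords ((c :: r).dropWhile (fun x => !PySem.Chars.isspace x))
  termination_by ls => ls.length
  decreasing_by
    · simp
    · rename_i hc
      have h1 : List.dropWhile (fun x => !PySem.Chars.isspace x) (c :: r)
          = List.dropWhile (fun x => !PySem.Chars.isspace x) r := by
        rw [List.dropWhile_cons_of_pos]; simp [hc]
      rw [h1]
      have h2 := List.length_dropWhile_le (fun x => !PySem.Chars.isspace x) r
      simp only [List.length_cons]
      omega

theorem pvWords_nil : pvWords [] = [] := by simp [pvWords]

theorem pvWords_cons (c : Char) (r : List Char) :
    pvWords (c :: r)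
      = if PySem.Chars.isspace c then pvWords r
        else ((c :: r).takeWhile (fun x => !PySem.Chars.isspace x))
              :: pvWords ((c :: r).dropWhile (fun x => !PySem.Chars.isspace x)) := by
  rw [pvWords.eq_def]

theorem pvGo_spec (s : List Char) : ∀ (cur : List Char) (acc : List (List Char)),
    PySem.Chars.split₀.go s cur acc
      = acc.reverse ++ (if cur.isEmpty then pvWords s
          else (cur.reverse ++ s.takeWhile (fun x => !PySem.Chars.isspace x))
                :: pvWords (s.dropWhile (fun x => !PySem.Chars.isspace x))) := by
  induction s with
  | nil =>
    intro cur acc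
    cases cur <;> simp [PySem.Chars.split₀.go, pvWords_nil]
  | cons c rest ih =>
    intro cur acc
    by_cases hc : PySem.Chars.isspace c
    · cases cur with
      | nil =>
        simp only [PySem.Chars.split₀.go, hc, if_pos, List.isEmpty_nil]
        rw [ih [] acc]
        simp [pvWords_cons, hc]
      | cons a as =>
        simp only [PySem.Chars.split₀.go, hc, if_pos, List.isEmpty_cons]
        rw [ih [] ((a :: as).reverse :: acc)]
        simp [pvWords_cons, hc, List.takeWhile_cons, List.dropWhile_cons]
    · simp only [PySem.Chars.split₀.go, hc, if_neg, Bool.false_eq_true]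
      rw [ih (c :: cur) acc]
      cases cur with
      | nil =>
        simp [pvWords_cons, hc, List.takeWhile_cons, List.dropWhile_cons]
      | cons a as =>
        simp [pvWords_cons, hc, List.takeWhile_cons, List.dropWhile_cons]

theorem pvSplit₀_eq_words (s : List Char) : PySem.Chars.split₀ s = pvWords s := by
  have h := pvGo_spec s [] []
  simpa [PySem.Chars.split₀] using h

theorem pvWords_nil_iff (s : List Char) :
    (pvWords s = []) ↔ s.any (fun x => !PySem.Chars.isspace x) = false := by
  induction s using pvWords.induct with
  | case1 => simp [pvWords_nil]
  | case2 c r hc ih => simp [pvWords_cons, hc, ih]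
  | case3 c r hc ih =>
    simp [pvWords_cons, hc]

theorem pvWords_any_triple (s : List Char) :
    (pvWords s).any (fun r => decide (3 ≤ r.length))
      = pvHasTriple (fun x => !PySem.Chars.isspace x) s := by
  induction s using pvWords.induct with
  | case1 => simp [pvWords_nil, pvHasTriple]
  | case2 c r hc ih =>
    rw [pvWords_cons, if_pos hc, ih, pvHasTriple_cons_neg _ c r (by simp [hc])]
  | case3 c r hc ih =>
    rw [pvWords_cons, if_neg hc]
    rw [List.any_cons, ih]
    rw [pvHasTriple_split (fun x => !PySem.Chars.isspace x) (c :: r)]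
    rfl

-- chars of the masked word: nonspace exactly at the vowels
theorem pvMask_nonspace (c : Char) :
    (!PySem.Chars.isspace (bMask c)) = pvVowelsA.contains c := by
  by_cases hc : pvVowelsA.contains c
  · have : c = 'a' ∨ c = 'e' ∨ c = 'i' ∨ c = 'o' ∨ c = 'u' := by
      simpa [pvVowelsA] using hc
    rcases this with h | h | h | h | h <;> subst h <;> simp [bMask] <;> decide
  · simp [bMask, hc]
    simp at hc
    simp [hc]
    decide

-- the two per-word decisions agree
theorem pvKeep_eq (w : String) : pvKeepA w = bKeep w := by
  cases h : w.toList with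
  | nil =>
    simp [pvKeepA, bKeep, h, PySem.Chars.lower, PySem.Chars.split₀, PySem.Chars.split₀.go]
  | cons c rest =>
    simp only [pvKeepA, bKeep, h]
    simp only [PySem.Chars.lower, List.map_cons]
    rw [pvSplit₀_eq_words]
    -- nonspace chars of the masked word = vowels of the word
    have hanyeq : (bMask (PySem.Chars.lowerChar c)
          :: List.map bMask (List.map PySem.Chars.lowerChar rest)).any
            (fun x => !PySem.Chars.isspace x)
        = (c :: rest).any (fun l => pvVowelsA.contains (PySem.Chars.lowerChar l)) := by
      simp only [List.any_cons, List.any_map]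
      have hx := PySem.List.any_congr_mem (l := rest)
          (f := ((fun x => !PySem.Chars.isspace x) ∘ bMask) ∘ PySem.Chars.lowerChar)
          (g := fun l => pvVowelsA.contains (PySem.Chars.lowerChar l))
          (fun x _ => by simp [Function.comp_apply, pvMask_nonspace])
      rw [hx, pvMask_nonspace]
    -- a run of length ≥ 3 among the split pieces = the counter loop hits 3
    have htripeq : (pvWords (bMask (PySem.Chars.lowerChar c)
          :: List.map bMask (List.map PySem.Chars.lowerChar rest))).any
            (fun r => decide (3 ≤ r.length))
        = aScan (c :: rest) 0 := by
      rw [pvWords_any_triple, pvScan0_eq]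
      have h1 : (bMask (PySem.Chars.lowerChar c)
            :: List.map bMask (List.map PySem.Chars.lowerChar rest))
          = ((c :: rest).map PySem.Chars.lowerChar).map bMask := rfl
      rw [h1, pvHasTriple_map, pvHasTriple_map]
      simp [pvMask_nonspace]
    cases hw : pvWords (bMask (PySem.Chars.lowerChar c)
        :: List.map bMask (List.map PySem.Chars.lowerChar rest)) with
    | nil =>
      have hA : ((c :: rest).any fun l => pvVowelsA.contains (PySem.Chars.lowerChar l))
          = false := by
        rw [← hanyeq]; exact (pvWords_nil_iff _).mp hw
      split_ifs <;> first | rfl | exact hA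
    | cons r0 rs =>
      have hA : ((c :: rest).any fun l => pvVowelsA.contains (PySem.Chars.lowerChar l))
          = true := by
        by_contra hAn
        have hnil : pvWords (bMask (PySem.Chars.lowerChar c)
            :: List.map bMask (List.map PySem.Chars.lowerChar rest)) = [] :=
          (pvWords_nil_iff _).mpr (by rw [hanyeq]; simpa using hAn)
        rw [hw] at hnil
        cases hnil
      rw [hw] at htripeq
      by_cases h1 : pvVowelsA.contains (PySem.Chars.lowerChar c)
      · have h1' : decide (PySem.Chars.lowerChar c ∈ pvVowelsA) = true := by
          simpa using h1
        simp [h1']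
      · dsimp only
        rw [if_neg h1, if_neg h1]
        cases hm : PySem.List.max? (r0.length :: List.map (fun r => r.length) rs)
            (fun x => x) with
        | none =>
          exact absurd (Iff.mp (PySem.List.max?_eq_none_iff _ _) hm) (by simp)
        | some m =>
          have hmax := PySem.List.max?_isMax hm
          have hmem := PySem.List.max?_mem hm
          by_cases h2 : aScan (c :: rest) 0
          · rcases List.any_eq_true.mp (htripeq.trans h2) with ⟨r, hrmem, hr3⟩
            have hle : r.length ≤ m :=
              hmax r.length (List.mem_map.mpr ⟨r, hrmem, rfl⟩)
            simp only [decide_eq_true_eq] at hr3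
            have hm3 : ¬ m < 3 := by omega
            rw [if_pos h2]
            simp [hm3]
          · have hallm : m < 3 := by
              have hmemL : m ∈ (r0 :: rs).map (fun r => r.length) := hmem
              rcases List.mem_map.mp hmemL with ⟨r, hrmem, hrm⟩
              by_contra hge
              have hAny : (r0 :: rs).any (fun r => decide (3 ≤ r.length)) = true :=
                List.any_eq_true.mpr ⟨r, hrmem, by simp only [decide_eq_true_eq]; omega⟩
              rw [htripeq] at hAny
              exact absurd hAny (by simp [h2])
            rw [if_neg h2, hA]
            simp [hallm]

-- ===== A side: the fold is 'insert the kept words' =====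
theorem pvProc_eq (s : PySem.Set String) (w : String) :
    aProcWord s w = if pvKeepA w then PySem.Set.add s w else s := by
  cases h : w.toList with
  | nil => simp [aProcWord, pvKeepA, h]
  | cons c rest =>
    simp only [aProcWord, pvKeepA, h]
    by_cases h1 : PySem.Chars.lowerChar c ∈ pvVowelsA
    · simp [h1]
    · by_cases h2 : aScan (c :: rest) 0
      · simp [h1, h2]
      · by_cases h3 : (c :: rest).any (fun l => pvVowelsA.contains (PySem.Chars.lowerChar l)) <;>
          simp [h1, h2, h3]

theorem pvFoldl_eq_update (ws : List String) (s : PySem.Set String) :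
    ws.foldl aProcWord s = PySem.Set.update s (ws.filter pvKeepA) := by
  induction ws generalizing s with
  | nil => rfl
  | cons w t ih =>
    rw [List.foldl_cons, pvProc_eq, List.filter_cons]
    by_cases hk : pvKeepA w
    · simp only [hk, if_pos]
      rw [ih]
      rfl
    · simp only [hk, Bool.false_eq_true, if_neg, ih]
      rfl

-- ===== B side: the fold is 'filter the adjacent-deduplicated list' =====
def pvDedup : Option String → List String → List String
  | _, [] => []
  | prev, x :: t => if some x = prev then pvDedup prev t else x :: pvDedup (some x) t

theorem pvFoldl_bStep (S : List String) : ∀ (prev : Option String) (out : List String),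
    (S.foldl bStep (prev, out)).2 = out ++ (pvDedup prev S).filter bKeep := by
  induction S with
  | nil => intro prev out; simp [pvDedup]
  | cons x t ih =>
    intro prev out
    rw [List.foldl_cons]
    by_cases hx : some x = prev
    · simp only [bStep, hx, beq_self_eq_true, if_pos]
      rw [ih prev out]
      simp [pvDedup, hx]
    · have hbeq : (some x == prev) = false := by simpa using hx
      simp only [bStep, hbeq, Bool.false_eq_true, if_neg, if_false]
      rw [ih (some x)]
      rw [pvDedup, if_neg hx, List.filter_cons]
      by_cases hk : bKeep x <;> simp [hk]

theorem pvDedup_spec (S : List String) : ∀ (prev : Option String),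
    S.Pairwise (· ≤ ·) → (∀ x ∈ S, ∀ y, prev = some y → y ≤ x) →
    (pvDedup prev S).Pairwise (· < ·)
      ∧ (∀ a, a ∈ pvDedup prev S ↔ a ∈ S ∧ some a ≠ prev) := by
  induction S with
  | nil => intro prev _ _; simp [pvDedup]
  | cons x t ih =>
    intro prev hp hb
    have hxt : ∀ b ∈ t, x ≤ b := fun b hbm => (List.pairwise_cons.mp hp).1 b hbm
    have hpt : t.Pairwise (· ≤ ·) := (List.pairwise_cons.mp hp).2
    by_cases hx : some x = prev
    · rw [pvDedup, if_pos hx]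
      have hb' : ∀ z ∈ t, ∀ y, prev = some y → y ≤ z := by
        intro z hz y hy
        rw [← hx] at hy
        cases hy
        exact hxt z hz
      obtain ⟨hpw, hmem⟩ := ih prev hpt hb'
      refine ⟨hpw, fun a => ?_⟩
      rw [hmem a]
      constructor
      · rintro ⟨ha, hne⟩; exact ⟨List.mem_cons_of_mem x ha, hne⟩
      · rintro ⟨ha, hne⟩
        rcases List.mem_cons.mp ha with rfl | ha'
        · exact absurd hx hne
        · exact ⟨ha', hne⟩
    · rw [pvDedup, if_neg hx]
      have hb' : ∀ z ∈ t, ∀ y, (some x : Option String) = some y → y ≤ z := by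
        intro z hz y hy
        cases hy
        exact hxt z hz
      obtain ⟨hpw, hmem⟩ := ih (some x) hpt hb'
      constructor
      · refine List.pairwise_cons.mpr ⟨?_, hpw⟩
        intro b hbm
        obtain ⟨hbt, hbne⟩ := (hmem b).mp hbm
        exact lt_of_le_of_ne (hxt b hbt) (fun hEq => hbne (by rw [hEq]))
      · intro a
        rw [List.mem_cons, hmem a]
        constructor
        · rintro (rfl | ⟨hat, hane⟩)
          · exact ⟨List.mem_cons_self, hx⟩
          · refine ⟨List.mem_cons_of_mem x hat, ?_⟩
            intro hap
            rcases hap ▸ hb with hbnd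
            have hax : x ≤ a := hxt a hat
            have h2 : a ≤ x := hbnd x List.mem_cons_self a rfl
            exact hane (by rw [le_antisymm h2 hax])
        · rintro ⟨ha, hane⟩
          rcases List.mem_cons.mp ha with rfl | hat
          · exact Or.inl rfl
          · by_cases hax : a = x
            · exact Or.inl hax
            · exact Or.inr ⟨hat, by simpa using hax⟩

-- the core identity: sorted(set(filter k ws)) = filter k (dedup(sorted ws))
theorem pvMain (ws : List String) (k : String → Bool) :
    PySem.List.sorted (PySem.Set.ofList (ws.filter k)) (fun x => x) false
      = (pvDedup none (PySem.List.sorted ws (fun x => x) false)).filter k := by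
  set S := PySem.List.sorted ws (fun x => x) false with hS
  have hpwS : S.Pairwise (· ≤ ·) := by
    have := PySem.List.sorted_pairwise ws (fun x => x)
    simpa [hS] using this
  obtain ⟨hpw, hmem⟩ := pvDedup_spec S none hpwS (by intro x _ y hy; cases hy)
  apply PySem.List.sorted_eq_of_perm_of_pairwise_lt
  · -- permutation: both are nodup with the same members
    have hnd1 : ((pvDedup none S).filter k).Nodup :=
      ((hpw.filter k).imp ne_of_lt)
    have hnd2 : (PySem.Set.ofList (ws.filter k)).Nodup := PySem.Set.nodup_ofList _
    rw [List.perm_ext_iff_of_nodup hnd1 hnd2]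
    intro a
    rw [List.mem_filter, hmem a, PySem.Set.mem_ofList, List.mem_filter]
    have hms : a ∈ S ↔ a ∈ ws := PySem.List.mem_sorted ws (fun x => x) false a
    constructor
    · rintro ⟨⟨ha, _⟩, hk⟩; exact ⟨hms.mp ha, hk⟩
    · rintro ⟨ha, hk⟩; exact ⟨⟨hms.mpr ha, by simp⟩, hk⟩
  · exact hpw.filter k

-- ===== VERDICT (by name: the statement is the Claim_ definition above) =====
theorem unique_words_with_vowels_spec : Claim_equal_unique_words_with_vowels := by
  intro s _
  unfold Spec_unique_words_with_vowels unique_words_with_vowels unique_words_with_vowels_alt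
  rw [pvFoldl_eq_update]
  rw [List.filter_congr (fun w _ => pvKeep_eq w)]
  rw [pvFoldl_bStep]
  rw [List.nil_append]
  exact pvMain (PySem.Str.split₀ s) bKeep
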